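-- pv_equiv track=rewrite | github.com/YZcat2023/PyMOL-AI-Agent-Plugin | markdown_renderer.py | _apply_dark_theme
-- ===== SOURCE A (Python) =====
-- def _apply_dark_theme(html):
--     """为HTML应用深色主题样式"""
--     replacements = {
--         '<table>': '<table style="border-collapse: collapse; margin: 12px 0; width: 100%; border: 1px solid #555555;">',
--         '<thead>': '<thead>',
--         '<tbody>': '<tbody>',
--         '<tr>': '<tr>',
--         '<th>': '<th style="background-color: #404040; color: #5DADE2; border: 1px solid #555555; padding: 8px 12px; font-weight: bold;">',
--         '<td>': '<td style="border: 1px solid #555555; padding: 6px 12px; color: #FFFFFF;">',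
--         '<code>': '<code style="background-color: #3A3A3A; color: #F5B041; padding: 2px 6px; border-radius: 3px; font-family: Consolas, Monaco, monospace; font-size: 13px;">',
--         '<pre>': '<pre style="background-color: #1E1E1E; border-radius: 6px; padding: 10px; margin: 8px 0; overflow-x: auto;">',
--         '<blockquote>': '<blockquote style="border-left: 3px solid #5DADE2; margin: 8px 0; padding-left: 12px; color: #CCCCCC; font-style: italic;">',
--         '<hr>': '<hr style="border: none; border-top: 1px solid #555555; margin: 12px 0;">',
--     }
--
--     for old, new in replacements.items():
--         html = html.replace(old, new)
--
--     return html
-- ===== SOURCE B (Python) =====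
-- # Single left-to-right scan driven by a tag-name -> inline-style table; the
-- # full replacement tokens are derived once from it instead of being spelled out.
-- _STYLES = {
--     'table': 'border-collapse: collapse; margin: 12px 0; width: 100%; border: 1px solid #555555;',
--     'thead': '',
--     'tbody': '',
--     'tr': '',
--     'th': 'background-color: #404040; color: #5DADE2; border: 1px solid #555555; padding: 8px 12px; font-weight: bold;',
--     'td': 'border: 1px solid #555555; padding: 6px 12px; color: #FFFFFF;',
--     'code': 'background-color: #3A3A3A; color: #F5B041; padding: 2px 6px; border-radius: 3px; font-family: Consolas, Monaco, monospace; font-size: 13px;',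
--     'pre': 'background-color: #1E1E1E; border-radius: 6px; padding: 10px; margin: 8px 0; overflow-x: auto;',
--     'blockquote': 'border-left: 3px solid #5DADE2; margin: 8px 0; padding-left: 12px; color: #CCCCCC; font-style: italic;',
--     'hr': 'border: none; border-top: 1px solid #555555; margin: 12px 0;',
-- }
--
-- _TABLE = [('<' + name + '>',
--            ('<' + name + ' style="' + style + '">') if style else ('<' + name + '>'))
--           for name, style in _STYLES.items()]
--
--
-- def _apply_dark_theme(html):
--     """One pass: at each '<' consult the derived token table once."""
--     out = []
--     i = 0
--     n = len(html)
--     while i < n: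
--         if html[i] == '<':
--             for old, new in _TABLE:
--                 if html.startswith(old, i):
--                     out.append(new)
--                     i += len(old)
--                     break
--             else:
--                 out.append('<')
--                 i += 1
--         else:
--             out.append(html[i])
--             i += 1
--     return ''.join(out)
-- ===== Notes on version B (the rewrite author's own statement) =====
-- stated objective: alternative
-- what changed: A runs ten sequential full-string .replace passes driven by a dict of full replacement tags; B keeps a tag-name to style table, derives the replacement tokens from it once, and makes a single left-to-right scan that consults the table only at each tag-opening character and copies every other character verbatim.
import Mathlib
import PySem

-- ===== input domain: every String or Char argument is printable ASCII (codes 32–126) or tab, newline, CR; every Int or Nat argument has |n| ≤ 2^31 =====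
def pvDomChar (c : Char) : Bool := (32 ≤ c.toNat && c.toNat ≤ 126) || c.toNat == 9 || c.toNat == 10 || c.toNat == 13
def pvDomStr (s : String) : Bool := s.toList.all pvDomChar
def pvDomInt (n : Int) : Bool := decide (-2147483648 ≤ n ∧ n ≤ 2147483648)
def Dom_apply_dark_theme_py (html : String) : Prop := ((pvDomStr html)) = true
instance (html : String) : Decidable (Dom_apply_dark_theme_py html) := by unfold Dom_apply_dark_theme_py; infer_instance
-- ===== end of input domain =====

-- B replaces A's ten sequential full-string .replace passes by ONE left-to-right scan over a
-- tag-name -> style table from which the replacement tokens are derived (objective: alternative).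

-- ===== PORT A =====
-- the dict literal of A (distinct keys, insertion order)
def pvPairs : List (String × String) :=
  [ ("<table>", "<table style=\"border-collapse: collapse; margin: 12px 0; width: 100%; border: 1px solid #555555;\">"),
    ("<thead>", "<thead>"),
    ("<tbody>", "<tbody>"),
    ("<tr>", "<tr>"),
    ("<th>", "<th style=\"background-color: #404040; color: #5DADE2; border: 1px solid #555555; padding: 8px 12px; font-weight: bold;\">"),
    ("<td>", "<td style=\"border: 1px solid #555555; padding: 6px 12px; color: #FFFFFF;\">"),
    ("<code>", "<code style=\"background-color: #3A3A3A; color: #F5B041; padding: 2px 6px; border-radius: 3px; font-family: Consolas, Monaco, monospace; font-size: 13px;\">"),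
    ("<pre>", "<pre style=\"background-color: #1E1E1E; border-radius: 6px; padding: 10px; margin: 8px 0; overflow-x: auto;\">"),
    ("<blockquote>", "<blockquote style=\"border-left: 3px solid #5DADE2; margin: 8px 0; padding-left: 12px; color: #CCCCCC; font-style: italic;\">"),
    ("<hr>", "<hr style=\"border: none; border-top: 1px solid #555555; margin: 12px 0;\">") ]

-- for old, new in replacements.items(): html = html.replace(old, new)
def apply_dark_theme_py (html : String) : String :=
  pvPairs.foldl (fun h kv => PySem.Str.replace h kv.1 kv.2) html

-- ===== PORT B =====
-- Source B's _STYLES: tag name -> inline style ('' = leave the tag bare), in dict order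
def pvStyles : List (String × String) :=
  [ ("table", "border-collapse: collapse; margin: 12px 0; width: 100%; border: 1px solid #555555;"),
    ("thead", ""),
    ("tbody", ""),
    ("tr", ""),
    ("th", "background-color: #404040; color: #5DADE2; border: 1px solid #555555; padding: 8px 12px; font-weight: bold;"),
    ("td", "border: 1px solid #555555; padding: 6px 12px; color: #FFFFFF;"),
    ("code", "background-color: #3A3A3A; color: #F5B041; padding: 2px 6px; border-radius: 3px; font-family: Consolas, Monaco, monospace; font-size: 13px;"),
    ("pre", "background-color: #1E1E1E; border-radius: 6px; padding: 10px; margin: 8px 0; overflow-x: auto;"),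
    ("blockquote", "border-left: 3px solid #5DADE2; margin: 8px 0; padding-left: 12px; color: #CCCCCC; font-style: italic;"),
    ("hr", "border: none; border-top: 1px solid #555555; margin: 12px 0;") ]

-- Source B's _TABLE: the replacement tokens derived once from _STYLES
def pvTags : List (List Char × List Char) :=
  pvStyles.map (fun p =>
    (("<" ++ p.1 ++ ">").toList,
     if p.2 = "" then ("<" ++ p.1 ++ ">").toList
     else ("<" ++ p.1 ++ " style=\"" ++ p.2 ++ "\">").toList))

-- the single scan of Source B: at '<', the first table entry matching at this position (the
-- for/break over _TABLE with startswith) is emitted and skipped; otherwise copy the character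
def pvScanTags (ts : List (List Char × List Char)) : List Char → List Char
  | [] => []
  | c :: rest =>
    if c = '<' then
      match ts.find? (fun kv => kv.1.isPrefixOf (c :: rest)) with
      | some kv => kv.2 ++ pvScanTags ts (rest.drop (kv.1.length - 1))
      | none => c :: pvScanTags ts rest
    else c :: pvScanTags ts rest
termination_by l => l.length
decreasing_by
  · simp only [List.length_drop, List.length_cons]; omega
  · simp only [List.length_cons]; omega
  · simp only [List.length_cons]; omega

def apply_dark_theme_py_alt (html : String) : String :=
  String.ofList (pvScanTags pvTags html.toList)

-- ===== PRECONDITION & SPEC =====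
def Spec_apply_dark_theme_py (html : String) (out : String) : Prop := out = apply_dark_theme_py_alt html
instance (html : String) (out : String) : Decidable (Spec_apply_dark_theme_py html out) := by unfold Spec_apply_dark_theme_py; infer_instance

-- ===== CLAIM (what is proved, stated in full; the proofs are below) =====
def Claim_equal_apply_dark_theme_py : Prop := ∀ (html : String), Dom_apply_dark_theme_py html → Spec_apply_dark_theme_py html (apply_dark_theme_py html)

-- ===== LEMMAS AND PROOFS =====

-- fuel-free reformulation of PySem.Chars.replace (for a nonempty pattern)
def pvRepl (old new : List Char) : List Char → List Char
  | [] => []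
  | c :: t =>
    if h : old ≠ [] ∧ old.isPrefixOf (c :: t)
    then new ++ pvRepl old new ((c :: t).drop old.length)
    else c :: pvRepl old new t
termination_by l => l.length
decreasing_by
  · have : 1 ≤ old.length := List.length_pos_iff.mpr h.1
    simp only [List.length_drop, List.length_cons]; omega
  · simp only [List.length_cons]; omega

theorem pvRepl_head (k v Z : List Char) (hk : k ≠ []) :
    pvRepl k v (k ++ Z) = v ++ pvRepl k v Z := by
  cases k with
  | nil => exact absurd rfl hk
  | cons x xs =>
    rw [List.cons_append, pvRepl, dif_pos ⟨hk, List.isPrefixOf_iff_prefix.mpr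
      (by rw [← List.cons_append]; exact List.prefix_append _ _)⟩]
    congr 1
    rw [← List.cons_append, List.drop_left]

theorem pvGo_eq (old new : List Char) (hne : old ≠ []) :
    ∀ fuel l acc, l.length ≤ fuel →
      PySem.Chars.replace.go old new fuel l acc = acc.reverse ++ pvRepl old new l := by
  intro fuel
  induction fuel with
  | zero =>
    intro l acc hl
    have : l = [] := List.length_eq_zero_iff.mp (Nat.le_zero.mp hl)
    subst this
    simp [PySem.Chars.replace.go, pvRepl]
  | succ n ih =>
    intro l acc hl
    cases l with
    | nil => simp [PySem.Chars.replace.go, pvRepl]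
    | cons c t =>
      rw [PySem.Chars.replace.go]
      by_cases hp : old.isPrefixOf (c :: t)
      · rw [if_pos hp]
        have hlen : 1 ≤ old.length := List.length_pos_iff.mpr hne
        have : (List.drop old.length (c :: t)).length ≤ n := by
          simp only [List.length_drop, List.length_cons]
          simp only [List.length_cons] at hl
          omega
        rw [ih _ _ this]
        rw [pvRepl, dif_pos ⟨hne, hp⟩]
        simp
      · rw [if_neg hp]
        have : t.length ≤ n := by simp only [List.length_cons] at hl; omega
        rw [ih _ _ this]
        rw [pvRepl, dif_neg (by simp [hp])]
        simp

theorem pvReplace_eq (old new s : List Char) (hne : old ≠ []) :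
    PySem.Chars.replace s old new = pvRepl old new s := by
  rw [PySem.Chars.replace]
  rw [if_neg (by simp [List.isEmpty_iff, hne])]
  simpa using pvGo_eq old new hne s.length s [] (le_refl _)

-- a well-formed table entry: key and value start with '<' and contain no other '<'
def pvGoodE (kv : List Char × List Char) : Prop :=
  kv.1 ≠ [] ∧ kv.1.head? = some '<' ∧ (∀ c ∈ kv.1.tail, c ≠ '<') ∧
  kv.2 ≠ [] ∧ kv.2.head? = some '<' ∧ (∀ c ∈ kv.2.tail, c ≠ '<')

-- k and w disagree at some position below both lengths (so k is no prefix of w ++ anything)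
def pvDiffMin (k w : List Char) : Prop :=
  ∃ q, q < min k.length w.length ∧ k[q]? ≠ w[q]?

theorem pvNotPrefix_of_diffMin {k w : List Char} (h : pvDiffMin k w) (X : List Char) :
    ¬ k <+: (w ++ X) := by
  rcases h with ⟨q, hq, hne⟩
  intro hp
  apply hne
  obtain ⟨t, ht⟩ := hp
  calc k[q]? = (k ++ t)[q]? := (List.getElem?_append_left (by omega)).symm
    _ = (w ++ X)[q]? := by rw [ht]
    _ = w[q]? := List.getElem?_append_left (by omega)

theorem pvScanTags_nil (ts : List (List Char × List Char)) : pvScanTags ts [] = [] := by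
  simp [pvScanTags]

theorem pvScanTags_some (ts : List (List Char × List Char)) (rest : List Char)
    (kv : List Char × List Char)
    (hf : ts.find? (fun kv => kv.1.isPrefixOf ('<' :: rest)) = some kv) :
    pvScanTags ts ('<' :: rest) = kv.2 ++ pvScanTags ts (rest.drop (kv.1.length - 1)) := by
  rw [pvScanTags, if_pos rfl, hf]

theorem pvScanTags_none (ts : List (List Char × List Char)) (rest : List Char)
    (hf : ts.find? (fun kv => kv.1.isPrefixOf ('<' :: rest)) = none) :
    pvScanTags ts ('<' :: rest) = '<' :: pvScanTags ts rest := by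
  rw [pvScanTags, if_pos rfl, hf]

theorem pvScanTags_other (ts : List (List Char × List Char)) (c : Char) (rest : List Char)
    (hc : c ≠ '<') : pvScanTags ts (c :: rest) = c :: pvScanTags ts rest := by
  rw [pvScanTags, if_neg hc]

theorem pvRepl_skip (k v u X : List Char) (hk : k.head? = some '<')
    (hu : ∀ c ∈ u, c ≠ '<') : pvRepl k v (u ++ X) = u ++ pvRepl k v X := by
  induction u with
  | nil => simp
  | cons a u ih =>
    have ha : a ≠ '<' := hu a (by simp)
    rw [List.cons_append, pvRepl, dif_neg]
    · rw [ih (fun c hc => hu c (by simp [hc]))]; simp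
    · rintro ⟨hne, hp⟩
      cases k with
      | nil => exact hne rfl
      | cons x xs =>
        simp at hk
        rcases List.cons_prefix_cons.mp (List.isPrefixOf_iff_prefix.mp hp) with ⟨h1, _⟩
        exact ha (h1 ▸ hk ▸ rfl)

theorem pvScan_skip (ts : List (List Char × List Char)) (u X : List Char)
    (hu : ∀ c ∈ u, c ≠ '<') : pvScanTags ts (u ++ X) = u ++ pvScanTags ts X := by
  induction u with
  | nil => simp
  | cons a u ih =>
    have ha : a ≠ '<' := hu a (by simp)
    rw [List.cons_append, pvScanTags_other ts a _ ha, ih (fun c hc => hu c (by simp [hc]))]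
    simp

theorem pvScan_nil_tags (l : List Char) : pvScanTags [] l = l := by
  induction l with
  | nil => exact pvScanTags_nil []
  | cons c rest ih =>
    by_cases hc : c = '<'
    · subst hc
      rw [pvScanTags_none [] rest (by simp), ih]
    · rw [pvScanTags_other [] c rest hc, ih]

theorem pvScan_nopre (ts : List (List Char × List Char)) (hts : ∀ kv ∈ ts, pvGoodE kv) :
    ∀ n l u, l.length ≤ n → u ≠ [] → (∀ c ∈ u, c ≠ '<') → ¬ u <+: l →
      ¬ u <+: pvScanTags ts l := by
  intro n
  induction n with
  | zero =>
    intro l u hl hne _ hnp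
    have : l = [] := List.length_eq_zero_iff.mp (Nat.le_zero.mp hl)
    subst this
    rw [pvScanTags_nil]
    intro hp
    exact hne (List.prefix_nil.mp hp)
  | succ n ih =>
    intro l u hl hne hu hnp
    cases l with
    | nil =>
      rw [pvScanTags_nil]
      intro hp
      exact hne (List.prefix_nil.mp hp)
    | cons c rest =>
      obtain ⟨a, u', rfl⟩ : ∃ a u', u = a :: u' := by
        cases u with
        | nil => exact absurd rfl hne
        | cons a u' => exact ⟨a, u', rfl⟩
      have ha : a ≠ '<' := hu a (by simp)
      by_cases hc : c = '<'
      · subst hc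
        cases hfind : ts.find? (fun kv => kv.1.isPrefixOf ('<' :: rest)) with
        | none =>
          rw [pvScanTags_none ts rest hfind]
          intro hp
          rcases List.cons_prefix_cons.mp hp with ⟨h1, _⟩
          exact ha h1
        | some kv =>
          rw [pvScanTags_some ts rest kv hfind]
          have hmem : kv ∈ ts := List.mem_of_find?_eq_some hfind
          obtain ⟨_, _, _, hv2, hv2h, _⟩ := hts kv hmem
          intro hp
          obtain ⟨b, w, hw⟩ : ∃ b w, kv.2 = b :: w := by
            cases h2 : kv.2 with
            | nil => exact absurd h2 hv2
            | cons b w => exact ⟨b, w, rfl⟩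
          rw [hw, List.cons_append] at hp
          rcases List.cons_prefix_cons.mp hp with ⟨h1, _⟩
          rw [hw] at hv2h; simp at hv2h
          exact ha (h1 ▸ hv2h ▸ rfl)
      · rw [pvScanTags_other ts c rest hc]
        intro hp
        rcases List.cons_prefix_cons.mp hp with ⟨h1, h2⟩
        subst h1
        cases u' with
        | nil => exact hnp (by simp)
        | cons b u'' =>
          have hnp' : ¬ (b :: u'') <+: rest := by
            intro h; exact hnp (List.cons_prefix_cons.mpr ⟨rfl, h⟩)
          exact ih rest (b :: u'') (by simp at hl; omega) (by simp)
            (fun c hc => hu c (by simp at hc ⊢; tauto)) hnp' h2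

theorem pvMain (ts : List (List Char × List Char)) (k v : List Char)
    (hts : ∀ kv ∈ ts, pvGoodE kv) (hkv : pvGoodE (k, v))
    (hd : ∀ kv ∈ ts, pvDiffMin k kv.2) :
    ∀ n l, l.length ≤ n →
      pvRepl k v (pvScanTags ts l) = pvScanTags (ts ++ [(k, v)]) l := by
  obtain ⟨hk1, hk2, hk3, hv1, hv2, hv3⟩ := hkv
  simp only at hk1 hk2 hk3 hv1 hv2 hv3
  intro n
  induction n with
  | zero =>
    intro l hl
    have : l = [] := List.length_eq_zero_iff.mp (Nat.le_zero.mp hl)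
    subst this
    rw [pvScanTags_nil, pvScanTags_nil, pvRepl]
  | succ n ih =>
    intro l hl
    cases l with
    | nil => rw [pvScanTags_nil, pvScanTags_nil, pvRepl]
    | cons c rest =>
      simp only [List.length_cons] at hl
      by_cases hc : c = '<'
      · subst hc
        cases hfind : ts.find? (fun kv => kv.1.isPrefixOf ('<' :: rest)) with
        | some kv =>
          rw [pvScanTags_some ts rest kv hfind]
          have hmem : kv ∈ ts := List.mem_of_find?_eq_some hfind
          obtain ⟨_, _, _, hkv2, hkv2h, hkv2t⟩ := hts kv hmem
          obtain ⟨b, w, hw⟩ : ∃ b w, kv.2 = b :: w := by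
            cases h2 : kv.2 with
            | nil => exact absurd h2 hkv2
            | cons b w => exact ⟨b, w, rfl⟩
          have hnp : ¬ k <+: (kv.2 ++ pvScanTags ts (rest.drop (kv.1.length - 1))) :=
            pvNotPrefix_of_diffMin (hd kv hmem) _
          rw [hw] at hnp ⊢
          rw [List.cons_append, pvRepl, dif_neg (by
            rintro ⟨_, hp⟩
            exact hnp (by rw [List.cons_append]; exact List.isPrefixOf_iff_prefix.mp hp))]
          rw [pvRepl_skip k v w _ hk2 (by
            intro c hcw
            apply hkv2t
            rw [hw]; simp [hcw])]
          rw [ih (rest.drop (kv.1.length - 1)) (by simp [List.length_drop]; omega)]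
          have hf' : (ts ++ [(k, v)]).find? (fun kv => kv.1.isPrefixOf ('<' :: rest)) = some kv := by
            rw [List.find?_append, hfind]; rfl
          rw [pvScanTags_some _ rest kv hf', hw]
          simp
        | none =>
          by_cases hkp : k.isPrefixOf ('<' :: rest)
          · -- the appended entry matches here
            have hkpre : k <+: '<' :: rest := List.isPrefixOf_iff_prefix.mp hkp
            obtain ⟨kt, hkt⟩ : ∃ kt, k = '<' :: kt := by
              cases hkk : k with
              | nil => exact absurd hkk hk1
              | cons x xs =>
                rw [hkk] at hk2; simp at hk2
                exact ⟨xs, by rw [hk2]⟩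
            have hktp : kt <+: rest := by
              rw [hkt] at hkpre
              exact (List.cons_prefix_cons.mp hkpre).2
            obtain ⟨Y, hY⟩ := hktp
            have hktn : ∀ c ∈ kt, c ≠ '<' := by
              rw [hkt] at hk3; simpa using hk3
            have hscanrest : pvScanTags ts rest = kt ++ pvScanTags ts Y := by
              rw [← hY, pvScan_skip ts kt Y hktn]
            rw [pvScanTags_none ts rest hfind, hscanrest]
            have hrw : ('<' : Char) :: (kt ++ pvScanTags ts Y) = k ++ pvScanTags ts Y := by
              rw [hkt]; simp
            rw [hrw, pvRepl_head k v _ hk1, ih Y (by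
              have := congrArg List.length hY
              simp at this; omega)]
            have hf' : (ts ++ [(k, v)]).find? (fun kv => kv.1.isPrefixOf ('<' :: rest)) = some (k, v) := by
              rw [List.find?_append, hfind]
              simp [hkp]
            rw [pvScanTags_some _ rest (k, v) hf']
            have hdrop : rest.drop (k.length - 1) = Y := by
              rw [hkt, ← hY]; simp
            rw [hdrop]
          · -- nothing matches at this '<'
            have hknp : ¬ k <+: '<' :: rest := fun h =>
              hkp (List.isPrefixOf_iff_prefix.mpr h)
            obtain ⟨kt, hkt⟩ : ∃ kt, k = '<' :: kt := by
              cases hkk : k with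
              | nil => exact absurd hkk hk1
              | cons x xs =>
                rw [hkk] at hk2; simp at hk2
                exact ⟨xs, by rw [hk2]⟩
            have hktne : kt ≠ [] := by
              intro h
              exact hknp (by rw [hkt, h]; simp)
            have hktnp : ¬ kt <+: rest := by
              intro h
              exact hknp (by rw [hkt]; exact List.cons_prefix_cons.mpr ⟨rfl, h⟩)
            have hnps : ¬ kt <+: pvScanTags ts rest :=
              pvScan_nopre ts hts n rest kt (by omega) hktne
                (by rw [hkt] at hk3; simpa using hk3) hktnp
            rw [pvScanTags_none ts rest hfind]
            rw [pvRepl, dif_neg (by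
              rintro ⟨_, hp⟩
              rw [hkt] at hp
              rcases List.cons_prefix_cons.mp (List.isPrefixOf_iff_prefix.mp hp) with ⟨_, h2⟩
              exact hnps h2)]
            rw [ih rest (by omega)]
            have hf' : (ts ++ [(k, v)]).find? (fun kv => kv.1.isPrefixOf ('<' :: rest)) = none := by
              rw [List.find?_append, hfind]
              simp [hkp]
            rw [pvScanTags_none _ rest hf']
      · rw [pvScanTags_other ts c rest hc]
        rw [pvRepl, dif_neg (by
          rintro ⟨_, hp⟩
          obtain ⟨kt, hkt⟩ : ∃ kt, k = '<' :: kt := by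
            cases hkk : k with
            | nil => exact absurd hkk hk1
            | cons x xs =>
              rw [hkk] at hk2; simp at hk2
              exact ⟨xs, by rw [hk2]⟩
          rw [hkt] at hp
          rcases List.cons_prefix_cons.mp (List.isPrefixOf_iff_prefix.mp hp) with ⟨h1, _⟩
          exact hc h1.symm)]
        rw [ih rest (by omega)]
        rw [pvScanTags_other _ c rest hc]

theorem pvChain (ts : List (List Char × List Char)) (hts : ∀ kv ∈ ts, pvGoodE kv)
    (hp : List.Pairwise (fun a b => pvDiffMin b.1 a.2) ts) (l : List Char) :
    ts.foldl (fun h kv => pvRepl kv.1 kv.2 h) l = pvScanTags ts l := by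
  induction ts using List.reverseRecOn generalizing l with
  | nil => simp [pvScan_nil_tags]
  | append_singleton ts t ihts =>
    rw [List.foldl_append]
    simp only [List.foldl_cons, List.foldl_nil]
    have hts' : ∀ kv ∈ ts, pvGoodE kv := fun kv h => hts kv (by simp [h])
    have hp' : List.Pairwise (fun a b => pvDiffMin b.1 a.2) ts :=
      (List.pairwise_append.mp hp).1
    have hd : ∀ kv ∈ ts, pvDiffMin t.1 kv.2 := by
      intro kv h
      exact (List.pairwise_append.mp hp).2.2 kv h t (by simp)
    rw [ihts hts' hp']
    exact pvMain ts t.1 t.2 hts' (hts t (by simp)) hd l.length l (le_refl _)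

theorem pvFold_toList (ps : List (String × String)) (s : String)
    (hne : ∀ p ∈ ps, p.1.toList ≠ []) :
    (ps.foldl (fun h kv => PySem.Str.replace h kv.1 kv.2) s).toList =
      (ps.map (fun p => (p.1.toList, p.2.toList))).foldl (fun h kv => pvRepl kv.1 kv.2 h) s.toList := by
  induction ps generalizing s with
  | nil => simp
  | cons p ps ih =>
    simp only [List.foldl_cons, List.map_cons]
    rw [ih _ (fun q hq => hne q (by simp [hq]))]
    congr 1
    rw [PySem.Str.toList_replace]
    exact pvReplace_eq _ _ _ (hne p (by simp))

-- A's token table and Source B's derived table carry the same (key, replacement) char lists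
set_option maxRecDepth 8000 in
theorem pvMapEq : pvPairs.map (fun p => (p.1.toList, p.2.toList)) = pvTags := by decide

-- Boolean forms of the table conditions, evaluated once by `decide`
def pvGoodB (kv : List Char × List Char) : Bool :=
  !kv.1.isEmpty && kv.1.head? == some '<' && kv.1.tail.all (fun c => c != '<') &&
  !kv.2.isEmpty && kv.2.head? == some '<' && kv.2.tail.all (fun c => c != '<')

def pvDiffB (k w : List Char) : Bool :=
  (List.range (min k.length w.length)).any (fun q => k[q]? != w[q]?)

def pvPairwiseB : List (List Char × List Char) → Bool
  | [] => true
  | x :: xs => xs.all (fun y => pvDiffB y.1 x.2) && pvPairwiseB xs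

theorem pvGoodB_to_E (kv : List Char × List Char) (h : pvGoodB kv = true) : pvGoodE kv := by
  simp only [pvGoodB, Bool.and_eq_true, Bool.not_eq_true', beq_iff_eq,
    List.all_eq_true, bne_iff_ne] at h
  exact ⟨List.isEmpty_eq_false_iff.mp h.1.1.1.1.1, h.1.1.1.1.2,
    fun c hc => h.1.1.1.2 c hc, List.isEmpty_eq_false_iff.mp h.1.1.2, h.1.2,
    fun c hc => h.2 c hc⟩

theorem pvDiffB_to_Min (k w : List Char) (h : pvDiffB k w = true) : pvDiffMin k w := by
  simp only [pvDiffB, List.any_eq_true, List.mem_range, bne_iff_ne] at h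
  exact h

theorem pvPairwiseB_to_P (ts : List (List Char × List Char)) (h : pvPairwiseB ts = true) :
    List.Pairwise (fun a b => pvDiffMin b.1 a.2) ts := by
  induction ts with
  | nil => exact List.Pairwise.nil
  | cons x xs ih =>
    rw [pvPairwiseB, Bool.and_eq_true] at h
    exact List.Pairwise.cons
      (fun y hy => pvDiffB_to_Min y.1 x.2 (List.all_eq_true.mp h.1 y hy)) (ih h.2)

set_option maxRecDepth 8000 in
theorem pvTags_good_b : pvTags.all pvGoodB = true := by decide

set_option maxRecDepth 8000 in
theorem pvTags_pairwise_b : pvPairwiseB pvTags = true := by decide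

-- ===== VERDICT (by name: the statement is the Claim_ definition above) =====
theorem apply_dark_theme_py_spec : Claim_equal_apply_dark_theme_py := by
  intro html _
  unfold Spec_apply_dark_theme_py apply_dark_theme_py apply_dark_theme_py_alt
  have hGood : ∀ kv ∈ pvTags, pvGoodE kv := fun kv h =>
    pvGoodB_to_E kv (List.all_eq_true.mp pvTags_good_b kv h)
  have hne : ∀ p ∈ pvPairs, p.1.toList ≠ [] := by
    intro p hp
    exact (hGood (p.1.toList, p.2.toList) (pvMapEq ▸ List.mem_map_of_mem hp)).1
  have h1 := pvFold_toList pvPairs html hne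
  have h2 := pvChain pvTags hGood (pvPairwiseB_to_P pvTags pvTags_pairwise_b) html.toList
  apply String.toList_inj.mp
  rw [h1, pvMapEq, h2]
  simp
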